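-- pv_equiv track=rewrite | github.com/LeeJuhae/Algorithm_study | monthly/1/3.py | solution
-- ===== SOURCE A (Python) =====
-- def solution(balloons):
-- 	answer = 1
-- 	l_min = balloons[0]
-- 	r_min = min(balloons[1:])
-- 	for idx in range(1,len(balloons)):
-- 		if balloons[idx] == r_min:
-- 			if idx +1 != len(balloons):
-- 				r_min = min(balloons[idx+1:])
-- 				if max(l_min, r_min, balloons[idx]) != balloons[idx]:
-- 					answer += 1
-- 				l_min = min(l_min, balloons[idx])
-- 			else:
-- 				answer += 1
-- 		else:
-- 			if max(l_min, r_min, balloons[idx]) != balloons[idx]: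
-- 				answer += 1
-- 			l_min = min(l_min, balloons[idx])
-- 	return answer
-- ===== SOURCE B (Python) =====
-- def solution(balloons):
--     n = len(balloons)
--     suf = [0] * n
--     suf[n - 1] = balloons[n - 1]
--     for i in range(n - 2, -1, -1):
--         suf[i] = min(balloons[i], suf[i + 1])
--     count = 2
--     pre = balloons[0]
--     for i in range(1, n - 1):
--         if balloons[i] < pre or balloons[i] < suf[i + 1]:
--             count += 1
--         pre = min(pre, balloons[i])
--     return count
-- ===== Notes on version B (the rewrite author's own statement) =====
-- stated objective: faster
-- what changed: A re-scans the remaining suffix with min(balloons[idx+1:]) inside its loop (quadratic); B precomputes a suffix-minimum array once and does a single forward pass with a running prefix minimum.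
import Mathlib
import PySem

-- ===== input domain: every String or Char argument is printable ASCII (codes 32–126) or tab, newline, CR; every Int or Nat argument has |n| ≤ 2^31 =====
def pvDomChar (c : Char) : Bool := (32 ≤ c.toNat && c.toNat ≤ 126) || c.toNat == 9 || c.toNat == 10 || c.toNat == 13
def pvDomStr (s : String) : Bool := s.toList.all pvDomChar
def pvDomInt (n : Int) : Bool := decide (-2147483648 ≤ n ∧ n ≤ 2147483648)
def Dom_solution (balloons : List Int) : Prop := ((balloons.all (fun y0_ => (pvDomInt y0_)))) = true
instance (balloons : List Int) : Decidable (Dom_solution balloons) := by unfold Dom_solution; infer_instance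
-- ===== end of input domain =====

-- B replaces A's repeated min() over slices (quadratic) by a precomputed suffix-minimum
-- list and a single pass with a running prefix minimum (linear).

-- ===== PORT A =====
-- min(xs) with no key (getD 0 is never reached on inputs where Python returns)
def pvMinD (xs : List Int) : Int := (PySem.List.min? xs (fun y => y)).getD 0

-- A's index loop `for idx in range(1, len(balloons))` as recursion on idx;
-- balloons[idx] via getElem? (idx ≥ 0, exact), slice balloons[idx+1:] via drop (exact for idx+1 ≥ 0)
def solutionGo (balloons : List Int) (idx : Nat) (answer l_min r_min : Int) : Int :=
  if h : idx < balloons.length then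
    let bi := balloons[idx]?.getD 0
    if bi = r_min then
      if idx + 1 ≠ balloons.length then
        let r' := pvMinD (balloons.drop (idx + 1))
        let answer' := if max l_min (max r' bi) ≠ bi then answer + 1 else answer
        solutionGo balloons (idx + 1) answer' (min l_min bi) r'
      else
        solutionGo balloons (idx + 1) (answer + 1) l_min r_min
    else
      let answer' := if max l_min (max r_min bi) ≠ bi then answer + 1 else answer
      solutionGo balloons (idx + 1) answer' (min l_min bi) r_min
  else answer
termination_by balloons.length - idx

def solution (balloons : List Int) : Int :=
  solutionGo balloons 1 1 (balloons[0]?.getD 0) (pvMinD (balloons.drop 1))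

-- ===== PORT B =====
-- B's backwards loop building suf (suf[i] = min(balloons[i], suf[i+1]), suf[n-1] = balloons[n-1])
-- as structural recursion producing the same list
def sufMins : List Int → List Int
  | [] => []
  | [x] => [x]
  | x :: y :: t =>
    match sufMins (y :: t) with
    | [] => [x]
    | m :: ms => min x m :: m :: ms

-- B's forward loop `for i in range(1, n-1)` with running prefix minimum
def solveGo (balloons suf : List Int) (i : Nat) (count pre : Int) : Int :=
  if h : i + 1 < balloons.length then
    let bi := balloons[i]?.getD 0
    let count' := if bi < pre ∨ bi < suf[i + 1]?.getD 0 then count + 1 else count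
    solveGo balloons suf (i + 1) count' (min pre bi)
  else count
termination_by balloons.length - i

def solution_alt (balloons : List Int) : Int :=
  solveGo balloons (sufMins balloons) 1 2 (balloons[0]?.getD 0)

-- ===== PRECONDITION & SPEC =====
-- A raises (IndexError on balloons[0] / ValueError from min of an empty slice) when len < 2
def Pre_solution (balloons : List Int) : Prop := 2 ≤ balloons.length
instance (balloons : List Int) : Decidable (Pre_solution balloons) := by unfold Pre_solution; infer_instance
def pvWitness_solution : List Int := ([1, 2, 1])

def Spec_solution (balloons : List Int) (out : Int) : Prop := out = solution_alt balloons
instance (balloons : List Int) (out : Int) : Decidable (Spec_solution balloons out) := by unfold Spec_solution; infer_instance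

-- ===== CLAIM (what is proved, stated in full; the proofs are below) =====
def Claim_equal_solution : Prop := ∀ (balloons : List Int), Dom_solution balloons → Pre_solution balloons → Spec_solution balloons (solution balloons)

-- ===== LEMMAS AND PROOFS =====

-- common reference count over the tail of the list
def pvG (l : Int) : List Int → Int
  | [] => 0
  | [_] => 0
  | x :: y :: t => (if x < l ∨ x < pvMinD (y :: t) then 1 else 0) + pvG (min l x) (y :: t)

theorem pvMinD_cons (x : Int) (t : List Int) : pvMinD (x :: t) = t.foldl min x := by
  simp [pvMinD, PySem.List.min?_id_cons]

theorem foldl_min_comm (t : List Int) : ∀ a c : Int, List.foldl min (min a c) t = min a (List.foldl min c t) := by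
  induction t with
  | nil => intro a c; simp
  | cons z t ih => intro a c; simp only [List.foldl_cons, min_assoc]; exact ih a (min c z)

theorem pvMinD_cons_cons (x y : Int) (t : List Int) :
    pvMinD (x :: y :: t) = min x (pvMinD (y :: t)) := by
  simp [pvMinD_cons, List.foldl_cons]
  exact foldl_min_comm t x y

theorem max_ne_iff (l r x : Int) : (max l (max r x) ≠ x) ↔ (x < l ∨ x < r) := by
  constructor <;> intro h <;> omega

theorem solutionGo_eq (s : List Int) : ∀ (b : List Int) (idx : Nat) (ans l : Int),
    b.drop idx = s → s ≠ [] →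
    solutionGo b idx ans l (pvMinD s) = ans + 1 + pvG l s := by
  induction s with
  | nil => intro _ _ _ _ _ h; exact absurd rfl h
  | cons x rest ih =>
    intro b idx ans l hd _
    have hlt : idx < b.length := by
      by_contra h
      have : b.drop idx = [] := List.drop_eq_nil_of_le (by omega)
      simp [this] at hd
    have hget : b[idx]?.getD 0 = x := by
      have : b[idx]? = (b.drop idx)[0]? := by simp [List.getElem?_drop]
      simp [this, hd]
    have htail : b.drop (idx + 1) = rest := by
      rw [← List.tail_drop, hd]; rfl
    cases rest with
    | nil =>
      have hlen : idx + 1 = b.length := by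
        have := congrArg List.length hd
        simp at this; omega
      rw [solutionGo]
      simp only [hlt, dif_pos, hget]
      have hr : pvMinD [x] = x := by simp [pvMinD_cons]
      rw [hr]
      simp only [hlen, ne_eq, not_true_eq_false, if_false]
      rw [solutionGo]
      simp only [pvG]
      simp
    | cons y t =>
      have hlen2 : idx + 1 < b.length := by
        by_contra h
        have : b.drop (idx + 1) = [] := List.drop_eq_nil_of_le (by omega)
        simp [this] at htail
      rw [solutionGo]
      simp only [hlt, dif_pos, hget]
      rw [pvMinD_cons_cons, htail]
      set m := pvMinD (y :: t) with hm
      by_cases hx : x = min x m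
      · simp only [if_pos hx, if_pos (show idx + 1 ≠ b.length by omega)]
        rw [ih b (idx + 1) _ (min l x) htail (by simp)]
        have hcond : (max l (max m x) ≠ x) = (x < l ∨ x < m) := by
          simp [max_ne_iff]
        simp only [pvG, ← hm]
        split_ifs with h1 h2 h2 <;> [ring; exact absurd h1 (by rw [hcond] at h1; omega); exact absurd (by rw [hcond]; omega) h1; ring]
      · have hmin : min x m = m := by omega
        rw [hmin] at hx ⊢
        simp only [if_neg hx]
        rw [ih b (idx + 1) _ (min l x) htail (by simp)]
        simp only [pvG, ← hm]
        have hcond : (max l (max m x) ≠ x) = (x < l ∨ x < m) := by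
          simp [max_ne_iff]
        split_ifs with h1 h2 h2 <;> [ring; exact absurd h1 (by rw [hcond] at h1; omega); exact absurd (by rw [hcond]; omega) h1; ring]

theorem sufMins_head (y : Int) (t : List Int) : ∃ ms, sufMins (y :: t) = pvMinD (y :: t) :: ms := by
  induction t generalizing y with
  | nil => exact ⟨[], by simp [sufMins, pvMinD_cons]⟩
  | cons z t' ih =>
    obtain ⟨ms, hms⟩ := ih z
    refine ⟨pvMinD (z :: t') :: ms, ?_⟩
    rw [sufMins, hms, pvMinD_cons_cons]

theorem sufMins_get (b : List Int) : ∀ i : Nat, i < b.length →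
    (sufMins b)[i]?.getD 0 = pvMinD (b.drop i) := by
  induction b with
  | nil => intro i h; simp at h
  | cons x rest ih =>
    intro i hi
    cases rest with
    | nil =>
      obtain rfl : i = 0 := by simp at hi; omega
      simp [sufMins, pvMinD_cons]
    | cons y t =>
      obtain ⟨ms, hms⟩ := sufMins_head y t
      cases i with
      | zero =>
        rw [sufMins, hms]
        simp [pvMinD_cons_cons]
      | succ i' =>
        rw [sufMins, hms]
        have := ih i' (by simpa using hi)
        rw [hms] at this
        simpa using this

theorem solveGo_eq (s : List Int) : ∀ (b : List Int) (i : Nat) (count pre : Int),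
    b.drop i = s →
    solveGo b (sufMins b) i count pre = count + pvG pre s := by
  induction s with
  | nil =>
    intro b i count pre hd
    have : b.length ≤ i := by
      by_contra h
      have := List.drop_eq_nil_iff.mp hd
      omega
    rw [solveGo]
    simp [show ¬ (i + 1 < b.length) by omega, pvG]
  | cons x rest ih =>
    intro b i count pre hd
    have hlt : i < b.length := by
      by_contra h
      have : b.drop i = [] := List.drop_eq_nil_of_le (by omega)
      simp [this] at hd
    have hget : b[i]?.getD 0 = x := by
      have : b[i]? = (b.drop i)[0]? := by simp [List.getElem?_drop]
      simp [this, hd]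
    have htail : b.drop (i + 1) = rest := by
      rw [← List.tail_drop, hd]; rfl
    cases rest with
    | nil =>
      have hlen : i + 1 = b.length := by
        have := congrArg List.length hd; simp at this; omega
      rw [solveGo]
      simp [show ¬ (i + 1 < b.length) by omega, pvG]
    | cons y t =>
      have hlen2 : i + 1 < b.length := by
        by_contra h
        have : b.drop (i + 1) = [] := List.drop_eq_nil_of_le (by omega)
        simp [this] at htail
      rw [solveGo]
      simp only [hlen2, dif_pos, hget]
      rw [sufMins_get b (i + 1) hlen2, htail]
      rw [ih b (i + 1) _ (min pre x) htail]
      simp only [pvG]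
      split_ifs with h1 <;> ring

-- ===== VERDICT (by name: the statement is the Claim_ definition above) =====
theorem solution_spec : Claim_equal_solution := by
  intro balloons _ hpre
  unfold Spec_solution solution solution_alt
  match balloons, hpre with
  | x :: y :: t, _ =>
    have hd : (x :: y :: t).drop 1 = y :: t := rfl
    rw [hd, solutionGo_eq (y :: t) (x :: y :: t) 1 1 _ hd (by simp)]
    rw [solveGo_eq (y :: t) (x :: y :: t) 1 2 _ hd]
    ring
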